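-- pv_equiv track=rewrite | github.com/anixes/AgentX | scripts/api_bridge.py | _stakeholder_weight
-- ===== SOURCE A (Python) =====
-- STAKEHOLDER_WEIGHTS: dict[str, int] = {
--     "recruiter": 90,
--     "hiring manager": 95,
--     "client": 85,
--     "employer": 85,
--     "manager": 80,
--     "friend": 40,
--     "personal": 30,
--     "system": 20,
--     "maintenance": 15,
--     "default": 35,
-- }
--
-- def _stakeholder_weight(task: dict) -> int:
--     title_lower = (task.get("title") or "").lower()
--     desc_lower = (task.get("description") or "").lower()
--     combined = f"{title_lower} {desc_lower}"
--     for keyword, weight in sorted(STAKEHOLDER_WEIGHTS.items(), key=lambda x: -x[1]):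
--         if keyword in combined:
--             return weight
--     return STAKEHOLDER_WEIGHTS["default"]
-- ===== SOURCE B (Python) =====
-- STAKEHOLDER_WEIGHTS: dict[str, int] = {
--     "recruiter": 90,
--     "hiring manager": 95,
--     "client": 85,
--     "employer": 85,
--     "manager": 80,
--     "friend": 40,
--     "personal": 30,
--     "system": 20,
--     "maintenance": 15,
--     "default": 35,
-- }
--
-- def _stakeholder_weight(task: dict) -> int:
--     combined = f"{(task.get('title') or '').lower()} {(task.get('description') or '').lower()}"
--     matched = [w for k, w in STAKEHOLDER_WEIGHTS.items() if k in combined]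
--     return max(matched, default=STAKEHOLDER_WEIGHTS["default"])
-- ===== Notes on version B (the rewrite author's own statement) =====
-- stated objective: simpler
-- what changed: B drops the descending sort and the early-return scan: it filters the weight table once in insertion order and returns the maximum matched weight (default 35 when nothing matches), which equals A's first match in the sorted order.
import Mathlib
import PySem

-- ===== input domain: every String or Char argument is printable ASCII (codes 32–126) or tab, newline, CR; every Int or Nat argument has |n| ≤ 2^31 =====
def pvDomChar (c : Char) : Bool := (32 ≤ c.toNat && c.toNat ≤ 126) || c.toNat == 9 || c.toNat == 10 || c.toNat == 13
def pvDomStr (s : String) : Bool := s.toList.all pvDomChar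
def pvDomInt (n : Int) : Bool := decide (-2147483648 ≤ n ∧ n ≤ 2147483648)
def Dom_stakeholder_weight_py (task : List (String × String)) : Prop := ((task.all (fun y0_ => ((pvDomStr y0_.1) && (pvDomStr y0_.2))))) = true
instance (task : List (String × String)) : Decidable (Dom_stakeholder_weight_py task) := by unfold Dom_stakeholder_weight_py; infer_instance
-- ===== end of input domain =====

-- B replaces A's sort-then-first-match scan by a single filter over the weight table in
-- insertion order followed by a max with default; same return value on every input.

-- ===== PORT A =====
-- STAKEHOLDER_WEIGHTS, in Python insertion order
def pvWeights : List (String × Int) :=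
  [("recruiter", 90), ("hiring manager", 95), ("client", 85), ("employer", 85),
   ("manager", 80), ("friend", 40), ("personal", 30), ("system", 20),
   ("maintenance", 15), ("default", 35)]

-- the 'for keyword, weight in …: if keyword in combined: return weight' loop with its
-- fall-through 'return STAKEHOLDER_WEIGHTS["default"]' (key literally present, so getD 0 is exact)
def pvALoop (combined : List Char) : List (String × Int) → Int
  | [] => (PySem.Dict.get? ⟨pvWeights⟩ "default").getD 0
  | (keyword, weight) :: rest =>
      if PySem.Chars.isIn keyword.toList combined then weight else pvALoop combined rest

def stakeholder_weight_py (task : List (String × String)) : Int :=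
  let title_lower := PySem.Chars.lower ((PySem.Dict.get? ⟨task⟩ "title").getD "").toList
  let desc_lower := PySem.Chars.lower ((PySem.Dict.get? ⟨task⟩ "description").getD "").toList
  let combined := title_lower ++ [' '] ++ desc_lower
  pvALoop combined (PySem.List.sorted pvWeights (fun x => -x.2))

-- ===== PORT B =====
def stakeholder_weight_py_alt (task : List (String × String)) : Int :=
  let combined := PySem.Chars.lower ((PySem.Dict.get? ⟨task⟩ "title").getD "").toList
                  ++ [' '] ++ PySem.Chars.lower ((PySem.Dict.get? ⟨task⟩ "description").getD "").toList
  let matched := (pvWeights.filter (fun p => PySem.Chars.isIn p.1.toList combined)).map (fun p => p.2)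
  PySem.List.maxD matched (fun w => w) ((PySem.Dict.get? ⟨pvWeights⟩ "default").getD 0)

-- ===== PRECONDITION & SPEC =====
def Spec_stakeholder_weight_py (task : List (String × String)) (out : Int) : Prop := out = stakeholder_weight_py_alt task
instance (task : List (String × String)) (out : Int) : Decidable (Spec_stakeholder_weight_py task out) := by unfold Spec_stakeholder_weight_py; infer_instance

-- ===== CLAIM (what is proved, stated in full; the proofs are below) =====
def Claim_equal_stakeholder_weight_py : Prop := ∀ (task : List (String × String)), Dom_stakeholder_weight_py task → Spec_stakeholder_weight_py task (stakeholder_weight_py task)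

-- ===== LEMMAS AND PROOFS =====

-- the sorted order A scans, named explicitly (stable sort: client before employer)
def pvDesc : List (String × Int) :=
  [("hiring manager", 95), ("recruiter", 90), ("client", 85), ("employer", 85),
   ("manager", 80), ("friend", 40), ("default", 35), ("personal", 30),
   ("system", 20), ("maintenance", 15)]

theorem pvSorted_eq : PySem.List.sorted pvWeights (fun x => -x.2) = pvDesc := by decide

-- max of (w :: l) with the identity key is w when w dominates l
theorem pvMax?_cons_of_le (w : Int) (l : List Int) (h : ∀ x ∈ l, x ≤ w) :
    PySem.List.max? (w :: l) (fun y => y) = some w := by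
  unfold PySem.List.max?
  rw [List.foldl_cons]
  induction l generalizing w with
  | nil => rfl
  | cons x t ih =>
      have hx : ¬ w < x := not_lt.mpr (h x (by simp))
      simp only [List.foldl_cons]
      rw [if_neg hx]
      exact ih w (fun y hy => h y (by simp [hy]))

-- first match on a descending list equals max of all matches (default 35)
theorem pvLoop_eq_maxD (c : List Char) (ys : List (String × Int))
    (hd : ys.Pairwise (fun a b => b.2 ≤ a.2)) :
    pvALoop c ys =
      PySem.List.maxD ((ys.filter (fun p => PySem.Chars.isIn p.1.toList c)).map (fun p => p.2))
        (fun w => w) 35 := by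
  induction ys with
  | nil =>
      simp only [pvALoop, List.filter_nil, List.map_nil]
      decide
  | cons p rest ih =>
      obtain ⟨k, w⟩ := p
      rcases List.pairwise_cons.mp hd with ⟨hle, hrest⟩
      by_cases hin : PySem.Chars.isIn k.toList c = true
      · have hall : ∀ x ∈ (rest.filter (fun p => PySem.Chars.isIn p.1.toList c)).map
            (fun p => p.2), x ≤ w := by
          intro x hx
          obtain ⟨q, hq, rfl⟩ := List.mem_map.mp hx
          exact hle q (List.mem_of_mem_filter hq)
        simp only [pvALoop, hin, if_pos, List.filter_cons, List.map_cons,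
          PySem.List.maxD, pvMax?_cons_of_le w _ hall, Option.getD_some]
      · simp only [pvALoop, hin, if_false, List.filter_cons]
        rw [if_neg (by simp [hin])]
        exact ih hrest

-- max of an Int list with the identity key is permutation-invariant
theorem pvMaxD_perm (l l' : List Int) (hp : l.Perm l') (d : Int) :
    PySem.List.maxD l (fun w => w) d = PySem.List.maxD l' (fun w => w) d := by
  unfold PySem.List.maxD
  rcases hl : PySem.List.max? l (fun w => w) with _ | m
  · have h1 : l = [] := (PySem.List.max?_eq_none_iff _ _).mp hl
    have h2 : l' = [] := (h1 ▸ hp).symm.eq_nil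
    rw [h2]
    rfl
  · rcases hl' : PySem.List.max? l' (fun w => w) with _ | m'
    · have h2 : l' = [] := (PySem.List.max?_eq_none_iff _ _).mp hl'
      have h1 : l = [] := (h2 ▸ hp).eq_nil
      rw [h1] at hl
      exact absurd hl (by simp [PySem.List.max?])
    · have hm : m ∈ l := PySem.List.max?_mem hl
      have hm' : m' ∈ l' := PySem.List.max?_mem hl'
      have h1 : m ≤ m' := PySem.List.max?_isMax hl' m (hp.mem_iff.mp hm)
      have h2 : m' ≤ m := PySem.List.max?_isMax hl m' (hp.mem_iff.mpr hm')
      simp [le_antisymm h1 h2]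

-- ===== VERDICT (by name: the statement is the Claim_ definition above) =====
theorem stakeholder_weight_py_spec : Claim_equal_stakeholder_weight_py := by
  intro task _
  unfold Spec_stakeholder_weight_py stakeholder_weight_py stakeholder_weight_py_alt
  rw [pvSorted_eq]
  set c := PySem.Chars.lower ((PySem.Dict.get? ⟨task⟩ "title").getD "").toList
            ++ [' '] ++ PySem.Chars.lower ((PySem.Dict.get? ⟨task⟩ "description").getD "").toList with hc
  have hperm : ((pvDesc.filter (fun p => PySem.Chars.isIn p.1.toList c)).map (fun p => p.2)).Perm
      ((pvWeights.filter (fun p => PySem.Chars.isIn p.1.toList c)).map (fun p => p.2)) := by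
    have h0 : (pvDesc : List (String × Int)).Perm pvWeights := by
      rw [← pvSorted_eq]; exact PySem.List.sorted_perm _ _ _
    exact (h0.filter _).map _
  rw [pvLoop_eq_maxD c pvDesc (by decide), pvMaxD_perm _ _ hperm]
  rfl
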